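-- pv_equiv track=rewrite | github.com/FabianSandi/portafolio2 | ejercicios de listas.py | PartirListaAuxv2
-- ===== SOURCE A (Python) =====
-- def PartirListaAuxv2(lista,sublista,resultado):
--     if lista==[]:
--         if sublista==[]:
--             return resultado
--         else:
--             return resultado + [sublista]
--     elif lista[0]>=0:
--         return PartirListaAuxv2(lista[1:],sublista+[lista[0]],resultado)
--     else:
--          return PartirListaAuxv2(lista[1:],[],resultado + [sublista])
-- ===== SOURCE B (Python) =====
-- def PartirListaAuxv2(lista, sublista, resultado):
--     result = list(resultado)
--     group = list(sublista)
--     for x in lista: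
--         if x >= 0:
--             group.append(x)
--         else:
--             result.append(group)
--             group = []
--     if group:
--         result.append(group)
--     return result
-- ===== Notes on version B (the rewrite author's own statement) =====
-- stated objective: faster
-- what changed: Replaced A's recursion with per-call list slicing/concatenation by a single iterative pass that appends in place to a (result, group) accumulator pair.
import Mathlib
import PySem

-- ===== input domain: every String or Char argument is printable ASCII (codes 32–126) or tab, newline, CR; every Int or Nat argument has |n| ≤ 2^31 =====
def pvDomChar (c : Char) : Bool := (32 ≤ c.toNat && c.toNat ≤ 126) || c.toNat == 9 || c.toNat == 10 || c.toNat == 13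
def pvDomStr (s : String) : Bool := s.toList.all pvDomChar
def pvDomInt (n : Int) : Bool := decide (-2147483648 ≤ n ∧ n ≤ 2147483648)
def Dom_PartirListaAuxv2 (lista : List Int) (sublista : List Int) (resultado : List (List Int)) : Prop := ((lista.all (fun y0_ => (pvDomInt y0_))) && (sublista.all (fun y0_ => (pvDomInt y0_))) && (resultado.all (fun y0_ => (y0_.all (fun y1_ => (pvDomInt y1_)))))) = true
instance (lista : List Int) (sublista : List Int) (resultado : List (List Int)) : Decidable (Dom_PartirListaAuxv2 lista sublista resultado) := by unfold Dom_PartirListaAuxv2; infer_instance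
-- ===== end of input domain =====

-- B replaces A's recursion (slicing/concatenating per element) with a single iterative accumulator pass.


-- ===== PORT A =====
def PartirListaAuxv2 (lista : List Int) (sublista : List Int) (resultado : List (List Int)) : List (List Int) :=
  match lista with
  | [] => if sublista = [] then resultado else resultado ++ [sublista]
  | x :: rest =>
    if x ≥ 0 then PartirListaAuxv2 rest (sublista ++ [x]) resultado
    else PartirListaAuxv2 rest [] (resultado ++ [sublista])

-- ===== PORT B =====
-- B: one iterative pass maintaining (result, group); append trailing group only if nonempty
def PartirListaAuxv2_alt (lista : List Int) (sublista : List Int) (resultado : List (List Int)) : List (List Int) :=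
  let st := lista.foldl (fun (st : List (List Int) × List Int) x =>
    if x ≥ 0 then (st.1, st.2 ++ [x]) else (st.1 ++ [st.2], [])) (resultado, sublista)
  if st.2 = [] then st.1 else st.1 ++ [st.2]

-- ===== PRECONDITION & SPEC =====
def Spec_PartirListaAuxv2 (lista : List Int) (sublista : List Int) (resultado : List (List Int)) (out : List (List Int)) : Prop := out = PartirListaAuxv2_alt lista sublista resultado
instance (lista : List Int) (sublista : List Int) (resultado : List (List Int)) (out : List (List Int)) : Decidable (Spec_PartirListaAuxv2 lista sublista resultado out) := by unfold Spec_PartirListaAuxv2; infer_instance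

-- ===== CLAIM (what is proved, stated in full; the proofs are below) =====
def Claim_equal_PartirListaAuxv2 : Prop := ∀ (lista : List Int) (sublista : List Int) (resultado : List (List Int)), Dom_PartirListaAuxv2 lista sublista resultado → Spec_PartirListaAuxv2 lista sublista resultado (PartirListaAuxv2 lista sublista resultado)

-- ===== LEMMAS AND PROOFS =====

-- ===== VERDICT (by name: the statement is the Claim_ definition above) =====
theorem partir_eq_alt (lista : List Int) : ∀ (sublista : List Int) (resultado : List (List Int)),
    PartirListaAuxv2 lista sublista resultado = PartirListaAuxv2_alt lista sublista resultado := by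
  induction lista with
  | nil => intro s r; simp [PartirListaAuxv2, PartirListaAuxv2_alt, List.foldl]
  | cons x rest ih =>
    intro s r
    by_cases h : x ≥ 0 <;>
      simp [PartirListaAuxv2, PartirListaAuxv2_alt, List.foldl, h, ih]

theorem PartirListaAuxv2_spec : Claim_equal_PartirListaAuxv2 := by
  intro l s r _
  unfold Spec_PartirListaAuxv2
  exact partir_eq_alt l s r
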